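-- pv_equiv track=rewrite | github.com/Umich-DNNG/pynoise | main_orig.py | any_and_all_cross_correlation_time_differences
-- ===== SOURCE A (Python) =====
-- def any_and_all_cross_correlation_time_differences(
--         time_vector,channels,reset_time
--         ):
--
--     time_diffs = []
--     for i in range(len(time_vector)):
--         for j in range(i+1, len(time_vector)):
--             if channels[j] - channels[i] != 0:
--                 if time_vector[j] - time_vector[i] > reset_time:
--                     break
--                 time_diffs.append(time_vector[j] - time_vector[i])
--
--     return time_diffs
-- ===== SOURCE B (Python) =====
-- def _prefix_within(diffs, reset_time):
--     kept = []
--     for d in diffs: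
--         if d > reset_time:
--             break
--         kept.append(d)
--     return kept
--
--
-- def any_and_all_cross_correlation_time_differences(
--         time_vector, channels, reset_time
--         ):
--     n = len(time_vector)
--     time_diffs = []
--     for i in range(n - 1):
--         ti = time_vector[i]
--         ci = channels[i]
--         cross = [time_vector[j] - ti for j in range(i + 1, n) if channels[j] != ci]
--         time_diffs += _prefix_within(cross, reset_time)
--     return time_diffs
-- ===== Notes on version B (the rewrite author's own statement) =====
-- stated objective: alternative
-- what changed: B replaces A's fused inner scan-with-break by a two-stage per-row decomposition: a filtered comprehension first collects all differing-channel time differences after i, and a separate helper then keeps the prefix of values <= reset_time.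
import Mathlib
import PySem

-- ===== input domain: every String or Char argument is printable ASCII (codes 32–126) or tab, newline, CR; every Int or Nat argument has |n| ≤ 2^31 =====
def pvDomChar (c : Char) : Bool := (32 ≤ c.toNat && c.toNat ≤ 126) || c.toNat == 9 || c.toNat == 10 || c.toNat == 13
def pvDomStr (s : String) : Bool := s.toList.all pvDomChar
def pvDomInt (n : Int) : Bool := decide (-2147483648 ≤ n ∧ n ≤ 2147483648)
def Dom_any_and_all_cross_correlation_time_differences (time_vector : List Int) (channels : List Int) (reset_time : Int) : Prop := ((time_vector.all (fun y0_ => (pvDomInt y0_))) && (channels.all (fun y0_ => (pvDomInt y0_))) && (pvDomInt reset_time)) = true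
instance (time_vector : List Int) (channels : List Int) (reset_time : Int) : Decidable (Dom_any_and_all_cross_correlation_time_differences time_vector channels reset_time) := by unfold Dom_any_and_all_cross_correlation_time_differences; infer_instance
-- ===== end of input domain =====

-- B restructures A's fused inner scan-with-break into a per-row filtered comprehension followed
-- by a prefix cut at reset_time (objective: alternative decomposition, same asymptotic cost).

-- ===== PORT A =====
-- inner loop 'for j in range(i+1, n): …' with break; acc threads the global time_diffs list.
-- indices are in range under Pre_, so getD is exact there.
def pvAInner (time_vector channels : List Int) (reset_time : Int) (i : Nat) :
    List Nat → List Int → List Int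
  | [], acc => acc
  | j :: js, acc =>
    if channels.getD j 0 - channels.getD i 0 ≠ 0 then
      if time_vector.getD j 0 - time_vector.getD i 0 > reset_time then acc
      else pvAInner time_vector channels reset_time i js
        (acc ++ [time_vector.getD j 0 - time_vector.getD i 0])
    else pvAInner time_vector channels reset_time i js acc

-- outer loop 'for i in range(len(time_vector)):'
def pvAOuter (time_vector channels : List Int) (reset_time : Int) (n : Nat) :
    List Nat → List Int → List Int
  | [], acc => acc
  | i :: is, acc =>
    pvAOuter time_vector channels reset_time n is
      (pvAInner time_vector channels reset_time i (List.range' (i + 1) (n - (i + 1))) acc)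

def any_and_all_cross_correlation_time_differences (time_vector : List Int) (channels : List Int) (reset_time : Int) : List Int :=
  pvAOuter time_vector channels reset_time time_vector.length
    (List.range time_vector.length) []

-- ===== PORT B =====
-- _prefix_within: 'kept = []; for d in diffs: if d > reset_time: break; kept.append(d)'
def pvPrefixWithin (reset_time : Int) : List Int → List Int → List Int
  | kept, [] => kept
  | kept, d :: ds =>
    if d > reset_time then kept else pvPrefixWithin reset_time (kept ++ [d]) ds

-- outer loop 'for i in range(n-1):' with the filtered comprehension 'cross'
def pvBOuter (time_vector channels : List Int) (reset_time : Int) (n : Nat) :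
    List Nat → List Int → List Int
  | [], acc => acc
  | i :: is, acc =>
    let ti := time_vector.getD i 0
    let ci := channels.getD i 0
    let cross := ((List.range' (i + 1) (n - (i + 1))).filter
        (fun j => channels.getD j 0 ≠ ci)).map (fun j => time_vector.getD j 0 - ti)
    pvBOuter time_vector channels reset_time n is (acc ++ pvPrefixWithin reset_time [] cross)

def any_and_all_cross_correlation_time_differences_alt (time_vector : List Int) (channels : List Int) (reset_time : Int) : List Int :=
  pvBOuter time_vector channels reset_time time_vector.length
    (List.range (time_vector.length - 1)) []

-- ===== PRECONDITION & SPEC =====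
-- Pre_ excludes exactly the inputs where the Python A raises IndexError: whenever
-- time_vector has ≥ 2 elements, channels[len(time_vector)-1] is always read, so channels
-- must be at least as long as time_vector; with ≤ 1 elements nothing is indexed.
def Pre_any_and_all_cross_correlation_time_differences (time_vector : List Int) (channels : List Int) (reset_time : Int) : Prop :=
  2 ≤ time_vector.length → time_vector.length ≤ channels.length
instance (time_vector : List Int) (channels : List Int) (reset_time : Int) : Decidable (Pre_any_and_all_cross_correlation_time_differences time_vector channels reset_time) := by unfold Pre_any_and_all_cross_correlation_time_differences; infer_instance

def pvWitness_any_and_all_cross_correlation_time_differences : List Int × List Int × Int :=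
  ([0, 3, 10], [1, 2, 1], 5)

def Spec_any_and_all_cross_correlation_time_differences (time_vector : List Int) (channels : List Int) (reset_time : Int) (out : List Int) : Prop := out = any_and_all_cross_correlation_time_differences_alt time_vector channels reset_time
instance (time_vector : List Int) (channels : List Int) (reset_time : Int) (out : List Int) : Decidable (Spec_any_and_all_cross_correlation_time_differences time_vector channels reset_time out) := by unfold Spec_any_and_all_cross_correlation_time_differences; infer_instance

-- ===== CLAIM (what is proved, stated in full; the proofs are below) =====
def Claim_equal_any_and_all_cross_correlation_time_differences : Prop := ∀ (time_vector : List Int) (channels : List Int) (reset_time : Int), Dom_any_and_all_cross_correlation_time_differences time_vector channels reset_time → Pre_any_and_all_cross_correlation_time_differences time_vector channels reset_time → Spec_any_and_all_cross_correlation_time_differences time_vector channels reset_time (any_and_all_cross_correlation_time_differences time_vector channels reset_time)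

-- ===== LEMMAS AND PROOFS =====

-- the per-row result of B, as a closed expression
def pvRow (time_vector channels : List Int) (reset_time : Int) (n : Nat) (i : Nat) : List Int :=
  pvPrefixWithin reset_time []
    (((List.range' (i + 1) (n - (i + 1))).filter
        (fun j => channels.getD j 0 ≠ channels.getD i 0)).map
      (fun j => time_vector.getD j 0 - time_vector.getD i 0))

theorem pvPrefixWithin_acc (reset_time : Int) (kept : List Int) (ds : List Int) :
    pvPrefixWithin reset_time kept ds = kept ++ pvPrefixWithin reset_time [] ds := by
  induction ds generalizing kept with
  | nil => simp [pvPrefixWithin]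
  | cons d ds ih =>
    simp only [pvPrefixWithin]
    split
    · simp
    · rw [ih (kept ++ [d]), ih ([] ++ [d])]; simp

theorem pvPrefixWithin_cons (reset_time d : Int) (ds : List Int) :
    pvPrefixWithin reset_time [] (d :: ds) =
      if d > reset_time then [] else d :: pvPrefixWithin reset_time [] ds := by
  simp only [pvPrefixWithin]
  split
  · rfl
  · rw [pvPrefixWithin_acc]; simp

theorem pvAInner_eq (time_vector channels : List Int) (reset_time : Int) (i : Nat)
    (js : List Nat) (acc : List Int) :
    pvAInner time_vector channels reset_time i js acc =
      acc ++ pvPrefixWithin reset_time []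
        ((js.filter (fun j => channels.getD j 0 ≠ channels.getD i 0)).map
          (fun j => time_vector.getD j 0 - time_vector.getD i 0)) := by
  induction js generalizing acc with
  | nil => simp [pvAInner, pvPrefixWithin]
  | cons j js ih =>
    simp only [pvAInner, List.filter_cons]
    by_cases hc : channels.getD j 0 = channels.getD i 0
    · have hb : decide (channels.getD j 0 ≠ channels.getD i 0) = false := by
        rw [hc]; simp
      rw [if_neg (show ¬ (channels.getD j 0 - channels.getD i 0 ≠ 0) by rw [hc]; simp),
        ih, if_neg (by rw [hb]; simp)]
    · have hb : decide (channels.getD j 0 ≠ channels.getD i 0) = true := by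
        rw [decide_eq_true_eq]; exact hc
      rw [if_pos (sub_ne_zero.mpr hc), hb, if_pos rfl, List.map_cons,
        pvPrefixWithin_cons]
      by_cases ht : time_vector.getD j 0 - time_vector.getD i 0 > reset_time
      · rw [if_pos ht, if_pos ht]; simp
      · rw [if_neg ht, if_neg ht, ih]; simp

theorem pvAOuter_eq (time_vector channels : List Int) (reset_time : Int) (n : Nat)
    (is : List Nat) (acc : List Int) :
    pvAOuter time_vector channels reset_time n is acc =
      acc ++ (is.map (pvRow time_vector channels reset_time n)).flatten := by
  induction is generalizing acc with
  | nil => simp [pvAOuter]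
  | cons i is ih =>
    simp only [pvAOuter, List.map_cons, List.flatten_cons]
    rw [ih, pvAInner_eq]
    simp [pvRow]

theorem pvBOuter_eq (time_vector channels : List Int) (reset_time : Int) (n : Nat)
    (is : List Nat) (acc : List Int) :
    pvBOuter time_vector channels reset_time n is acc =
      acc ++ (is.map (pvRow time_vector channels reset_time n)).flatten := by
  induction is generalizing acc with
  | nil => simp [pvBOuter]
  | cons i is ih =>
    simp only [pvBOuter]
    rw [ih]
    simp [pvRow]

theorem pvRow_last (time_vector channels : List Int) (reset_time : Int) (n : Nat)
    (_ : n ≠ 0) : pvRow time_vector channels reset_time n (n - 1) = [] := by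
  have : n - ((n - 1) + 1) = 0 := by omega
  simp [pvRow, this, pvPrefixWithin]

-- ===== VERDICT (by name: the statement is the Claim_ definition above) =====
theorem any_and_all_cross_correlation_time_differences_spec : Claim_equal_any_and_all_cross_correlation_time_differences := by
  intro time_vector channels reset_time _ _
  unfold Spec_any_and_all_cross_correlation_time_differences
  unfold any_and_all_cross_correlation_time_differences
  unfold any_and_all_cross_correlation_time_differences_alt
  rw [pvAOuter_eq, pvBOuter_eq]
  rcases Nat.eq_zero_or_pos time_vector.length with h0 | hpos
  · simp [h0]
  · have hn : time_vector.length = (time_vector.length - 1) + 1 := by omega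
    rw [hn, List.range_succ]
    simp
    exact pvRow_last time_vector channels reset_time _ (by omega)
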